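-- pv_equiv track=rewrite | github.com/swamp0407/competitive-programming | abc247/c/main.py | cul
-- ===== SOURCE A (Python) =====
-- d = {}
--
-- def cul(n):
--     if n == 1:
--         return [1]
--     if d.get(n-1):
--         a = d[n-1]
--     else:
--         a = cul(n-1)
--     return a + [n] + a
-- ===== SOURCE B (Python) =====
-- def cul(n):
--     # ruler sequence: position i (1-based) holds bit_length of the lowest set bit of i
--     return [(i & -i).bit_length() for i in range(1, 2 ** n)]
-- ===== Notes on version B (the rewrite author's own statement) =====
-- stated objective: idiomatic
-- what changed: replaces the recursive concatenation (with a dead, never-written memo dict) by a single comprehension that computes each position's ruler value directly as (i & -i).bit_length()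
-- outside the precondition, e.g. on cul(0): A raises RecursionError, B returns []
import Mathlib
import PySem

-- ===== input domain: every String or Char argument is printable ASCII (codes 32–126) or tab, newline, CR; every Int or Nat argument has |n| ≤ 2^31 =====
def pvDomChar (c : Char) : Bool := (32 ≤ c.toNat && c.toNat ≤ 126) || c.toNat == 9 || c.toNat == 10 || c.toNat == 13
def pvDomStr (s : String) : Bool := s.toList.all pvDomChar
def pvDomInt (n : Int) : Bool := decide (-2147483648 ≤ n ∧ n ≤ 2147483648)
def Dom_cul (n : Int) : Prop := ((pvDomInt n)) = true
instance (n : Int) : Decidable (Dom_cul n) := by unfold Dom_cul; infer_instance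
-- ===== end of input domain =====

-- B replaces A's recursion-with-concatenation (whose memo dict is never written) by a direct
-- comprehension computing each ruler value from its index; equivalence of RETURN values on n ≥ 1.

-- ===== PORT A =====
-- The module-level dict `d` is never written anywhere in the module, so `d.get(n-1)` is always
-- None and the `a = cul(n-1)` branch is always taken; the port carries the recursion directly.
-- `fuel` only makes the recursion total in Lean: for n ≥ 1 (Pre_) fuel n.toNat never runs out,
-- matching Python exactly; for n ≤ 0 Python recurses into a RecursionError (excluded by Pre_).
def culA : Nat → Int → List Int
  | 0, _ => []
  | fuel + 1, n =>
      if n = 1 then [1]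
      else
        let a := culA fuel (n - 1)
        a ++ [n] ++ a

def cul (n : Int) : List Int := culA n.toNat n

-- ===== PORT B =====
-- (i & -i).bit_length(): for the i ≥ 1 produced by the range the value is nonnegative,
-- so bit_length is Nat.size of its toNat (exact there). 2 ** n ported as 2 ^ n.toNat
-- (exact for n ≥ 0; for n < 0 Python's 2 ** n is a float and B raises, outside Pre_).
def pvVal (i : Int) : Int := Int.ofNat (Nat.size (Int.land i (-i)).toNat)

def cul_alt (n : Int) : List Int := (PySem.List.pyRange 1 ((2 : Int) ^ n.toNat) 1).map pvVal

-- ===== PRECONDITION & SPEC =====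
-- Pre_ excludes exactly n ≤ 0, where Python A recurses forever into a RecursionError.
def Pre_cul (n : Int) : Prop := 1 ≤ n
instance (n : Int) : Decidable (Pre_cul n) := by unfold Pre_cul; infer_instance
def pvWitness_cul : Int := (3)

def Spec_cul (n : Int) (out : List Int) : Prop := out = cul_alt n
instance (n : Int) (out : List Int) : Decidable (Spec_cul n out) := by unfold Spec_cul; infer_instance

-- ===== CLAIM (what is proved, stated in full; the proofs are below) =====
def Claim_equal_cul : Prop := ∀ (n : Int), Dom_cul n → Pre_cul n → Spec_cul n (cul n)

-- ===== LEMMAS AND PROOFS =====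

-- the ruler sequence, the common reference shape
def pvR : Nat → List Int
  | 0 => []
  | k + 1 => pvR k ++ [((k : Int) + 1)] ++ pvR k

theorem culA_eq_pvR (fuel : Nat) : ∀ (n : Int), 1 ≤ n → n ≤ (fuel : Int) →
    culA fuel n = pvR n.toNat := by
  induction fuel with
  | zero => intro n h1 h2; omega
  | succ f ih =>
    intro n h1 h2
    by_cases hn : n = 1
    · subst hn; simp [culA, pvR]
    · have h2' : (1 : Int) ≤ n - 1 := by omega
      have hr := ih (n - 1) h2' (by omega)
      have hnt : n.toNat = (n - 1).toNat + 1 := by omega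
      simp only [culA, if_neg hn, hr, hnt, pvR]
      have : (((n - 1).toNat : Int) + 1) = n := by omega
      rw [this]

theorem pvVal_ofNat (m : Nat) (h : 1 ≤ m) :
    pvVal (m : Int) = Int.ofNat (Nat.size (Nat.ldiff m (m - 1))) := by
  obtain ⟨k, rfl⟩ : ∃ k, m = k + 1 := ⟨m - 1, by omega⟩
  rfl

theorem ldiff_pow_self (k : Nat) : Nat.ldiff (2 ^ k) (2 ^ k - 1) = 2 ^ k := by
  apply Nat.eq_of_testBit_eq
  intro i
  rw [Nat.testBit_ldiff, Nat.testBit_two_pow_sub_one, Nat.testBit_two_pow]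
  by_cases h : k = i
  · subst h; simp
  · simp [h]

theorem ldiff_pow_add (k m : Nat) (h1 : 1 ≤ m) (h2 : m < 2 ^ k) :
    Nat.ldiff (2 ^ k + m) (2 ^ k + m - 1) = Nat.ldiff m (m - 1) := by
  have hm1 : m - 1 < 2 ^ k := by omega
  have heq : 2 ^ k + m - 1 = 2 ^ k + (m - 1) := by omega
  rw [heq]
  apply Nat.eq_of_testBit_eq
  intro i
  rw [Nat.testBit_ldiff, Nat.testBit_ldiff]
  rcases lt_trichotomy i k with hik | hik | hik
  · rw [Nat.testBit_two_pow_add_gt hik, Nat.testBit_two_pow_add_gt hik]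
  · subst hik
    rw [Nat.testBit_two_pow_add_eq, Nat.testBit_two_pow_add_eq]
    rw [Nat.testBit_eq_false_of_lt h2, Nat.testBit_eq_false_of_lt hm1]
    simp
  · have hp : 2 ^ k + m < 2 ^ i := by
      calc 2 ^ k + m < 2 ^ k + 2 ^ k := by omega
        _ = 2 ^ (k + 1) := by ring
        _ ≤ 2 ^ i := Nat.pow_le_pow_right (by norm_num) (by omega)
    rw [Nat.testBit_eq_false_of_lt hp,
        Nat.testBit_eq_false_of_lt (by omega : m < 2 ^ i)]
    simp

theorem pvVal_pow (k : Nat) : pvVal ((2 : Int) ^ k) = (k : Int) + 1 := by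
  have h : ((2 : Int) ^ k) = ((2 ^ k : Nat) : Int) := by push_cast; ring
  rw [h, pvVal_ofNat _ (Nat.one_le_two_pow), ldiff_pow_self, Nat.size_pow]
  simp [Int.ofNat_eq_natCast]

theorem pvVal_shift (k : Nat) (j : Int) (h1 : 1 ≤ j) (h2 : j < 2 ^ k) :
    pvVal ((2 : Int) ^ k + j) = pvVal j := by
  have hj : j = ((j.toNat : Nat) : Int) := by omega
  have h2n : j.toNat < 2 ^ k := by
    have : ((2 : Int) ^ k) = ((2 ^ k : Nat) : Int) := by push_cast; ring
    omega
  have hsum : (2 : Int) ^ k + j = ((2 ^ k + j.toNat : Nat) : Int) := by push_cast; omega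
  rw [hsum, hj, pvVal_ofNat _ (by omega), pvVal_ofNat _ (by omega)]
  simp only [Int.toNat_natCast]
  rw [ldiff_pow_add k j.toNat (by omega) h2n]

theorem map_pvVal_range (k : Nat) :
    (PySem.List.pyRange 1 ((2 : Int) ^ k) 1).map pvVal = pvR k := by
  induction k with
  | zero => simp [PySem.List.pyRange_one_eq_nil, pvR]
  | succ k ih =>
    have hc : (1 : Int) ≤ 2 ^ k := one_le_pow₀ (by norm_num)
    have hcc : ((2 : Int) ^ k) ≤ 2 ^ (k + 1) := by
      have : ((2 : Int) ^ (k + 1)) = 2 ^ k + 2 ^ k := by ring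
      omega
    rw [PySem.List.pyRange_one_append 1 ((2 : Int) ^ k) ((2 : Int) ^ (k + 1)) hc hcc]
    have hlt : (2 : Int) ^ k < 2 ^ (k + 1) := by
      have : ((2 : Int) ^ (k + 1)) = 2 ^ k + 2 ^ k := by ring
      omega
    rw [PySem.List.pyRange_one_cons hlt]
    -- rewrite the upper half as a shifted copy of the lower half
    have hupper : (PySem.List.pyRange ((2 : Int) ^ k + 1) ((2 : Int) ^ (k + 1)) 1).map pvVal
        = (PySem.List.pyRange 1 ((2 : Int) ^ k) 1).map pvVal := by
      rw [PySem.List.pyRange_one ((2 : Int) ^ k + 1) ((2 : Int) ^ (k + 1)),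
          PySem.List.pyRange_one 1 ((2 : Int) ^ k)]
      have hlen : ((2 : Int) ^ (k + 1) - (2 ^ k + 1)).toNat = ((2 : Int) ^ k - 1).toNat := by
        have : ((2 : Int) ^ (k + 1)) = 2 ^ k + 2 ^ k := by ring
        omega
      rw [hlen, List.map_map, List.map_map]
      apply List.map_congr_left
      intro t ht
      have htl : (t : Int) < 2 ^ k - 1 := by
        have := List.mem_range.mp ht
        omega
      show pvVal ((2 : Int) ^ k + 1 + (t : Int)) = pvVal (1 + (t : Int))
      have : (2 : Int) ^ k + 1 + (t : Int) = (2 : Int) ^ k + (1 + (t : Int)) := by ring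
      rw [this, pvVal_shift k (1 + (t : Int)) (by omega) (by omega)]
    simp only [List.map_append, List.map_cons, hupper, ih, pvVal_pow, pvR,
      List.append_assoc, List.singleton_append]

-- ===== VERDICT (by name: the statement is the Claim_ definition above) =====
theorem cul_spec : Claim_equal_cul := by
  intro n _ hp
  unfold Spec_cul cul cul_alt
  rw [culA_eq_pvR n.toNat n hp (by omega), map_pvVal_range]
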